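-- pv_equiv track=rewrite | github.com/thaurelia/egtb-priority | egtb.py | egtb_name_from_pieces
-- ===== SOURCE A (Python) =====
-- from typing import (
--     Callable,
--     Dict,
--     Iterable,
--     Iterator,
--     List,
--     Optional,
--     Tuple,
--     Union,
-- )
--
-- EGTB_PIECE_ORDER = {
--     'K': 0,
--     'Q': 1,
--     'R': 2,
--     'B': 3,
--     'N': 4,
--     'P': 5,
-- }
--
-- def egtb_name_from_pieces(pieces: Tuple[str]) -> str:
--     """
--     Construct EGTB name from the pieces configuration.
--
--     :param pieces: tuple with FEN pieces names
--     """
--     # Gather pieces for White and Black to construct the name: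
--     # "ALLCAPS(<more_pieces>)vALLCAPS(<less_pieces>)"
--     # Inside each section, pieces are sorted
--     # in the following order: KQRBNP
--     white_pieces, black_pieces = [], []
--     for p in pieces:
--         if p.isupper():
--             white_pieces.append(p)
--         else:
--             black_pieces.append(p.upper())
--
--     white = ''.join(sorted(white_pieces, key=EGTB_PIECE_ORDER.get))
--     black = ''.join(sorted(black_pieces, key=EGTB_PIECE_ORDER.get))
--
--     if len(white) > len(black):
--         return f'{white}v{black}'
--     else:
--         return f'{black}v{white}'
-- ===== SOURCE B (Python) =====
-- EGTB_PIECE_ORDER = {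
--     'K': 0,
--     'Q': 1,
--     'R': 2,
--     'B': 3,
--     'N': 4,
--     'P': 5,
-- }
--
--
-- def egtb_name_from_pieces(pieces):
--     """Construct EGTB name by bucket-counting pieces per colour (no comparison sort)."""
--     wcnt, bcnt = {}, {}
--     wext, bext = [], []
--     for p in pieces:
--         if p.isupper():
--             cnt, ext, q = wcnt, wext, p
--         else:
--             cnt, ext, q = bcnt, bext, p.upper()
--         if q in EGTB_PIECE_ORDER:
--             cnt[q] = cnt.get(q, 0) + 1
--         else:
--             ext.append(q)
--     white = ''.join([l * wcnt.get(l, 0) for l in 'KQRBNP'] + wext)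
--     black = ''.join([l * bcnt.get(l, 0) for l in 'KQRBNP'] + bext)
--     if len(white) > len(black):
--         return f'{white}v{black}'
--     else:
--         return f'{black}v{white}'
-- ===== Notes on version B (the rewrite author's own statement) =====
-- stated objective: alternative
-- what changed: Replaces A's per-colour comparison sort (sorted with an EGTB_PIECE_ORDER.get key) by a single-pass bucket count per colour keyed by the fixed KQRBNP order, building each colour string by letter repetition.
import Mathlib
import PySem

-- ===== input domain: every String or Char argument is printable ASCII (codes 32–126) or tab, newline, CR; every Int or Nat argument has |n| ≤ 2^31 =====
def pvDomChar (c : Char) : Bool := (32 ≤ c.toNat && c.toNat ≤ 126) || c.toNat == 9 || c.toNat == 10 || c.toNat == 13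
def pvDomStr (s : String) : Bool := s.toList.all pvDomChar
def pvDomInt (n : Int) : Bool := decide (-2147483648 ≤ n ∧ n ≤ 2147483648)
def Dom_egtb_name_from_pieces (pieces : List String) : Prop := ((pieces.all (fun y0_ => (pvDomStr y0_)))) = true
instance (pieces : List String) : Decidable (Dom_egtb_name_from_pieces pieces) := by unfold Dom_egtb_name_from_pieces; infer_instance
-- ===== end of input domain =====

-- B replaces A's comparison sort (sorted with a dict-lookup key) by bucket counting over the
-- fixed order KQRBNP; same return value wherever A returns (A raises TypeError outside Pre_).

-- ===== PORT A =====
-- shared helper: port of str.isupper() — exact on the printable-ASCII domain, where the cased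
-- characters are exactly the letters (at least one cased character and no lowercase one)
def pvIsUpper (s : String) : Bool :=
  s.toList.any (fun c => PySem.Chars.isupper c || PySem.Chars.islower c) &&
  s.toList.all (fun c => !(PySem.Chars.islower c))

def pvOrder : PySem.Dict String Int :=
  PySem.Dict.mk [("K", 0), ("Q", 1), ("R", 2), ("B", 3), ("N", 4), ("P", 5)]

-- hand port of the key comparison Python's sorted makes between EGTB_PIECE_ORDER.get(x) keys;
-- exact whenever both keys exist (otherwise CPython raises TypeError — outside Pre_ below)
def pvBefore (a b : String) : Bool :=
  match PySem.Dict.get? pvOrder a, PySem.Dict.get? pvOrder b with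
  | some x, some y => decide (x < y)
  | _, _ => false

-- hand port of sorted(xs, key=EGTB_PIECE_ORDER.get): stable insertion sort, exact where Python returns
def pvIns (x : String) : List String → List String
  | [] => [x]
  | y :: ys => if pvBefore x y then x :: y :: ys else y :: pvIns x ys

def pvSort (xs : List String) : List String := xs.foldl (fun acc x => pvIns x acc) []

def egtb_name_from_pieces (pieces : List String) : String :=
  let wb := pieces.foldl
    (fun (acc : List String × List String) p =>
      if pvIsUpper p then (acc.1 ++ [p], acc.2) else (acc.1, acc.2 ++ [PySem.Str.upper p]))
    ([], [])
  let white := PySem.Str.join "" (pvSort wb.1)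
  let black := PySem.Str.join "" (pvSort wb.2)
  -- the two f-strings are ported as join of their three parts (kernel-transparent concatenation)
  if PySem.Str.len white > PySem.Str.len black then PySem.Str.join "" [white, "v", black]
  else PySem.Str.join "" [black, "v", white]

-- ===== PORT B =====
def pvLetters : List String := ["K", "Q", "R", "B", "N", "P"]

-- port of the string repetition l * n
def pvStrMul (s : String) (n : Nat) : String := PySem.Str.join "" (List.replicate n s)

-- the body of Source B's 'if q in EGTB_PIECE_ORDER' on one colour's (counter, extras) state
def pvStep (st : PySem.Dict String Nat × List String) (q : String) :
    PySem.Dict String Nat × List String :=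
  if PySem.Dict.contains pvOrder q then (st.1.insert q (PySem.Dict.getD st.1 q 0 + 1), st.2)
  else (st.1, st.2 ++ [q])

-- port of ''.join([l * cnt.get(l, 0) for l in 'KQRBNP'] + ext)
def pvBuild (cnt : PySem.Dict String Nat) (ext : List String) : String :=
  PySem.Str.join "" (pvLetters.map (fun l => pvStrMul l (PySem.Dict.getD cnt l 0)) ++ ext)

def egtb_name_from_pieces_alt (pieces : List String) : String :=
  let st := pieces.foldl
    (fun (st : (PySem.Dict String Nat × List String) × (PySem.Dict String Nat × List String)) p =>
      if pvIsUpper p then (pvStep st.1 p, st.2) else (st.1, pvStep st.2 (PySem.Str.upper p)))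
    ((PySem.Dict.mk [], []), (PySem.Dict.mk [], []))
  let white := pvBuild st.1.1 st.1.2
  let black := pvBuild st.2.1 st.2.2
  if PySem.Str.len white > PySem.Str.len black then PySem.Str.join "" [white, "v", black]
  else PySem.Str.join "" [black, "v", white]

-- ===== PRECONDITION & SPEC =====
def pvWhite (pieces : List String) : List String := pieces.filter (fun p => pvIsUpper p)
def pvBlack (pieces : List String) : List String :=
  (pieces.filter (fun p => !(pvIsUpper p))).map PySem.Str.upper

-- Pre_ excludes exactly the inputs on which A raises TypeError: a colour with at least two
-- pieces one of which is outside K,Q,R,B,N,P (its sort key is None, which CPython's sorted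
-- cannot compare); A returns normally on every other input.
def Pre_egtb_name_from_pieces (pieces : List String) : Prop :=
  ((∀ x ∈ pvWhite pieces, x ∈ pvLetters) ∨ (pvWhite pieces).length ≤ 1) ∧
  ((∀ x ∈ pvBlack pieces, x ∈ pvLetters) ∨ (pvBlack pieces).length ≤ 1)

instance (pieces : List String) : Decidable (Pre_egtb_name_from_pieces pieces) := by
  unfold Pre_egtb_name_from_pieces; infer_instance

def pvWitness_egtb_name_from_pieces : List String := ["K", "Q", "k"]

def Spec_egtb_name_from_pieces (pieces : List String) (out : String) : Prop :=
  out = egtb_name_from_pieces_alt pieces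
instance (pieces : List String) (out : String) : Decidable (Spec_egtb_name_from_pieces pieces out) := by
  unfold Spec_egtb_name_from_pieces; infer_instance

-- ===== CLAIM (what is proved, stated in full; the proofs are below) =====
def Claim_equal_egtb_name_from_pieces : Prop := ∀ (pieces : List String),
  Dom_egtb_name_from_pieces pieces → Pre_egtb_name_from_pieces pieces →
  Spec_egtb_name_from_pieces pieces (egtb_name_from_pieces pieces)

-- ===== LEMMAS AND PROOFS =====

lemma pv_joinE (parts : List (List Char)) : PySem.Chars.join [] parts = parts.flatten := by
  induction parts with
  | nil => simp [PySem.Chars.join_nil]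
  | cons p ps ih =>
    cases ps with
    | nil => simp [PySem.Chars.join_singleton]
    | cons q qs => rw [PySem.Chars.join_cons_cons, ih]; simp

lemma pv_foldA (pieces : List String) (acc : List String × List String) :
    pieces.foldl
      (fun (acc : List String × List String) p =>
        if pvIsUpper p then (acc.1 ++ [p], acc.2) else (acc.1, acc.2 ++ [PySem.Str.upper p]))
      acc
    = (acc.1 ++ pvWhite pieces, acc.2 ++ pvBlack pieces) := by
  induction pieces generalizing acc with
  | nil => simp [pvWhite, pvBlack]
  | cons p rest ih =>
    by_cases h : pvIsUpper p = true <;>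
      simp [pvWhite, pvBlack, h, ih]

lemma pv_foldB (pieces : List String)
    (stw stb : PySem.Dict String Nat × List String) :
    pieces.foldl
      (fun (st : (PySem.Dict String Nat × List String) × (PySem.Dict String Nat × List String)) p =>
        if pvIsUpper p then (pvStep st.1 p, st.2) else (st.1, pvStep st.2 (PySem.Str.upper p)))
      (stw, stb)
    = ((pvWhite pieces).foldl pvStep stw, (pvBlack pieces).foldl pvStep stb) := by
  induction pieces generalizing stw stb with
  | nil => simp [pvWhite, pvBlack]
  | cons p rest ih =>
    by_cases h : pvIsUpper p = true <;>
      simp [pvWhite, pvBlack, h, ih]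

lemma pv_contains_order (x : String) :
    PySem.Dict.contains pvOrder x = true ↔ x ∈ pvLetters := by
  simp [pvOrder, pvLetters, PySem.Dict.contains]
  constructor
  · rintro (h | h | h | h | h | h) <;> simp_all [eq_comm]
  · rintro (rfl | rfl | rfl | rfl | rfl | rfl) <;> simp

lemma pv_sideFold_known (xs : List String) (h : ∀ x ∈ xs, x ∈ pvLetters)
    (cnt : PySem.Dict String Nat) (ext : List String) :
    (xs.foldl pvStep (cnt, ext)).2 = ext ∧
    ∀ l, PySem.Dict.getD (xs.foldl pvStep (cnt, ext)).1 l 0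
         = PySem.Dict.getD cnt l 0 + xs.count l := by
  induction xs generalizing cnt ext with
  | nil => simp
  | cons x rest ih =>
    have hx : x ∈ pvLetters := h x (by simp)
    have hc : PySem.Dict.contains pvOrder x = true := (pv_contains_order x).mpr hx
    have hstep : pvStep (cnt, ext) x
        = (cnt.insert x (PySem.Dict.getD cnt x 0 + 1), ext) := by
      simp [pvStep, hc]
    have ih' := ih (fun a ha => h a (by simp [ha]))
      (cnt.insert x (PySem.Dict.getD cnt x 0 + 1)) ext
    constructor
    · rw [List.foldl_cons, hstep]; exact ih'.1
    · intro l
      rw [List.foldl_cons, hstep, ih'.2 l, PySem.Dict.getD_insert]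
      by_cases hlx : l = x
      · subst hlx; rw [if_pos rfl, List.count_cons_self]; omega
      · rw [if_neg hlx, List.count_cons_of_ne (Ne.symm hlx)]

lemma pv_ins_pass {x y : String} (h : pvBefore x y = false) (n : Nat) (rest : List String) :
    pvIns x (List.replicate n y ++ rest) = List.replicate n y ++ pvIns x rest := by
  induction n with
  | zero => simp
  | succ n ih => simp [List.replicate_succ, pvIns, h, ih]

lemma pv_ins_front {x : String} {rest : List String} (h : ∀ y ∈ rest, pvBefore x y = true) :
    pvIns x rest = x :: rest := by
  cases rest with
  | nil => rfl
  | cons y t => simp [pvIns, h y (by simp)]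

def pvCanon (xs : List String) : List String :=
  pvLetters.flatMap (fun l => List.replicate (xs.count l) l)

lemma pv_ins_canon (xs : List String) {x : String} (hx : x ∈ pvLetters) :
    pvIns x (pvCanon xs) = pvCanon (xs ++ [x]) := by
  simp only [pvLetters, List.mem_cons, List.not_mem_nil, or_false] at hx
  rcases hx with rfl | rfl | rfl | rfl | rfl | rfl
  · simp only [pvCanon, pvLetters, List.flatMap_cons, List.flatMap_nil]
    repeat rw [pv_ins_pass (by decide)]
    rw [pv_ins_front (by
      intro y hy
      simp only [List.mem_append, List.mem_replicate, List.not_mem_nil, or_false] at hy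
      rcases hy with ⟨-, rfl⟩ | ⟨-, rfl⟩ | ⟨-, rfl⟩ | ⟨-, rfl⟩ | ⟨-, rfl⟩ <;> decide)]
    simp [List.count_append, List.replicate_succ', List.append_assoc]
  · simp only [pvCanon, pvLetters, List.flatMap_cons, List.flatMap_nil]
    repeat rw [pv_ins_pass (by decide)]
    rw [pv_ins_front (by
      intro y hy
      simp only [List.mem_append, List.mem_replicate, List.not_mem_nil, or_false] at hy
      rcases hy with ⟨-, rfl⟩ | ⟨-, rfl⟩ | ⟨-, rfl⟩ | ⟨-, rfl⟩ <;> decide)]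
    simp [List.count_append, List.replicate_succ', List.append_assoc]
  · simp only [pvCanon, pvLetters, List.flatMap_cons, List.flatMap_nil]
    repeat rw [pv_ins_pass (by decide)]
    rw [pv_ins_front (by
      intro y hy
      simp only [List.mem_append, List.mem_replicate, List.not_mem_nil, or_false] at hy
      rcases hy with ⟨-, rfl⟩ | ⟨-, rfl⟩ | ⟨-, rfl⟩ <;> decide)]
    simp [List.count_append, List.replicate_succ', List.append_assoc]
  · simp only [pvCanon, pvLetters, List.flatMap_cons, List.flatMap_nil]
    repeat rw [pv_ins_pass (by decide)]
    rw [pv_ins_front (by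
      intro y hy
      simp only [List.mem_append, List.mem_replicate, List.not_mem_nil, or_false] at hy
      rcases hy with ⟨-, rfl⟩ | ⟨-, rfl⟩ <;> decide)]
    simp [List.count_append, List.replicate_succ', List.append_assoc]
  · simp only [pvCanon, pvLetters, List.flatMap_cons, List.flatMap_nil]
    repeat rw [pv_ins_pass (by decide)]
    rw [pv_ins_front (by
      intro y hy
      simp only [List.mem_append, List.mem_replicate, List.not_mem_nil, or_false] at hy
      rcases hy with ⟨-, rfl⟩; decide)]
    simp [List.count_append, List.replicate_succ', List.append_assoc]
  · simp only [pvCanon, pvLetters, List.flatMap_cons, List.flatMap_nil]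
    repeat rw [pv_ins_pass (by decide)]
    rw [pv_ins_front (by simp)]
    simp [List.count_append, List.replicate_succ']

lemma pv_sort_canon (xs : List String) (h : ∀ x ∈ xs, x ∈ pvLetters) :
    pvSort xs = pvCanon xs := by
  induction xs using List.reverseRecOn with
  | nil => rfl
  | append_singleton ys x ih =>
    have h1 : pvSort (ys ++ [x]) = pvIns x (pvSort ys) := by
      simp [pvSort, List.foldl_append]
    rw [h1, ih (fun a ha => h a (by simp [ha])), pv_ins_canon ys (h x (by simp))]

lemma pv_join_canon (f : String → Nat) :
    PySem.Str.join "" (pvLetters.flatMap (fun l => List.replicate (f l) l)) =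
    PySem.Str.join "" (pvLetters.map (fun l => pvStrMul l (f l)) ++ ([] : List String)) := by
  rw [← String.toList_inj]
  simp [PySem.Str.toList_join, pv_joinE, pvStrMul, pvLetters,
    List.flatMap_cons, List.flatMap_nil, List.map_append, List.map_replicate,
    List.flatten_append]

lemma pv_getD_empty (l : String) :
    PySem.Dict.getD (PySem.Dict.mk ([] : List (String × Nat))) l 0 = 0 := rfl

lemma pv_side_eq (xs : List String)
    (hok : (∀ x ∈ xs, x ∈ pvLetters) ∨ xs.length ≤ 1) :
    PySem.Str.join "" (pvSort xs)
      = pvBuild (xs.foldl pvStep (PySem.Dict.mk [], [])).1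
                (xs.foldl pvStep (PySem.Dict.mk [], [])).2 := by
  by_cases hkn : ∀ x ∈ xs, x ∈ pvLetters
  · obtain ⟨hext, hcnt⟩ := pv_sideFold_known xs hkn (PySem.Dict.mk []) []
    rw [pv_sort_canon xs hkn, pvBuild, hext]
    have hmap : (pvLetters.map
        (fun l => pvStrMul l (PySem.Dict.getD (xs.foldl pvStep (PySem.Dict.mk [], [])).1 l 0)))
        = pvLetters.map (fun l => pvStrMul l (xs.count l)) := by
      apply List.map_congr_left
      intro l _
      rw [hcnt l, pv_getD_empty]
      simp
    rw [hmap]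
    exact pv_join_canon (fun l => xs.count l)
  · rcases hok with hok | hlen
    · exact absurd hok hkn
    · match xs, hlen with
      | [], _ => rfl
      | [x], _ =>
        have hx : x ∉ pvLetters := by
          intro hmem; exact hkn (by intro a ha; simp at ha; subst ha; exact hmem)
        have hc : PySem.Dict.contains pvOrder x = false := by
          rcases hcb : PySem.Dict.contains pvOrder x with _ | _
          · rfl
          · exact absurd ((pv_contains_order x).mp hcb) hx
        have hfold : [x].foldl pvStep (PySem.Dict.mk [], []) = (PySem.Dict.mk [], [x]) := by
          simp [pvStep, hc]
        rw [hfold]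
        rw [← String.toList_inj]
        simp [pvBuild, PySem.Str.toList_join, pv_joinE, pvStrMul,
          pvLetters, pvSort, pvIns, pv_getD_empty]

-- ===== VERDICT (by name: the statement is the Claim_ definition above) =====
theorem egtb_name_from_pieces_spec : Claim_equal_egtb_name_from_pieces := by
  intro pieces _ hpre
  obtain ⟨hw, hb⟩ := hpre
  show egtb_name_from_pieces pieces = egtb_name_from_pieces_alt pieces
  unfold egtb_name_from_pieces egtb_name_from_pieces_alt
  rw [pv_foldA, pv_foldB]
  simp only [List.nil_append]
  rw [← pv_side_eq (pvWhite pieces) hw, ← pv_side_eq (pvBlack pieces) hb]
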